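-- pv_equiv track=rewrite | github.com/Anfany/Codility-Lessons-By-Python3 | L5_Prefix Sums/5.2_GenomicRangeQuery.py | next_occur
-- ===== SOURCE A (Python) =====
-- def next_occur(S, X):
--     """
--     计算字符串S中，对于核苷酸X，下一个出现该核苷酸的索引，如果当前是X，则索引为当前的索引
--     :param S: DNA字符串
--     :param X: 核苷酸
--     :return: 所以序列
--     """
--     index_list =[-1] * len(S)
--     for index, value in enumerate(S[::-1]):  # 注意字符串反转
--         if value == X:
--             index_list[index] = len(S) - index - 1
--         else:
--             index_list[index] = index_list[index-1]
--     return index_list[::-1]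
-- ===== SOURCE B (Python) =====
-- def next_occur(S, X):
--     # Two-phase: collect occurrence positions, then fill result by ranges.
--     positions = [i for i, c in enumerate(S) if c == X]
--     result = [-1] * len(S)
--     start = 0
--     for o in positions:
--         for p in range(start, o + 1):
--             result[p] = o
--         start = o + 1
--     return result
-- ===== Notes on version B (the rewrite author's own statement) =====
-- stated objective: alternative
-- what changed: Instead of a backward carry over the reversed string (copying the previous slot on non-matches), B first builds the list of occurrence positions and then fills the result array forward in ranges between consecutive occurrences, leaving trailing positions -1.
import Mathlib
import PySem

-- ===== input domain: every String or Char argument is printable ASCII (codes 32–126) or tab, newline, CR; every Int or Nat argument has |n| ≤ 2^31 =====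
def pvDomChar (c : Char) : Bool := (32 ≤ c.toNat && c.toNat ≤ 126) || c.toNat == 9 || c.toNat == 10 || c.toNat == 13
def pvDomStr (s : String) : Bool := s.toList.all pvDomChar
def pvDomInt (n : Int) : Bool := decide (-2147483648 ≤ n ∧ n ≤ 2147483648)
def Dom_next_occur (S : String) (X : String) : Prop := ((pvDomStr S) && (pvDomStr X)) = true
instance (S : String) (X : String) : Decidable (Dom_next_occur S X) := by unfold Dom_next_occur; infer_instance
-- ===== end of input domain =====

-- B replaces A's backward carry over the reversed string by a two-phase occurrence-table fill; alternative decomposition, same O(n) cost.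


-- ===== PORT A =====
-- the loop 'for index, value in enumerate(S[::-1]): …'; the read index_list[index-1]
-- is always in range in Python (the list is nonempty whenever the loop runs), so .getD's default is never used
def nextOccurLoopA (X : String) (n : Int) : List (Int × Char) → List Int → List Int
  | [], acc => acc
  | (i, c) :: rest, acc =>
    nextOccurLoopA X n rest
      (if X.toList = [c] then acc.set i.toNat (n - i - 1)
       else acc.set i.toNat ((PySem.List.pyGet? acc (i - 1)).getD (-1)))

-- index_list = [-1] * len(S); loop over enumerate(S[::-1]); return index_list[::-1]
def next_occur (S : String) (X : String) : List Int :=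
  (nextOccurLoopA X (S.toList.length : Int) (PySem.List.enumerate S.toList.reverse 0)
    (List.replicate S.toList.length (-1))).reverse

-- ===== PORT B =====
-- 'for p in range(start, o+1): result[p] = o'
def nextOccurFillB (o : Int) (res : List Int) (start : Int) : List Int :=
  (PySem.List.pyRange start (o + 1)).foldl (fun r p => r.set p.toNat o) res

-- positions = [i for i, c in enumerate(S) if c == X]; result = [-1]*len(S); fill [start, o] per occurrence o
def next_occur_alt (S : String) (X : String) : List Int :=
  ((((PySem.List.enumerate S.toList 0).filter (fun ic => X.toList == [ic.2])).map (·.1)).foldl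
    (fun (st : List Int × Int) o => (nextOccurFillB o st.1 st.2, o + 1))
    (List.replicate S.toList.length (-1), 0)).1

-- ===== PRECONDITION & SPEC =====
def Spec_next_occur (S : String) (X : String) (out : List Int) : Prop := out = next_occur_alt S X
instance (S : String) (X : String) (out : List Int) : Decidable (Spec_next_occur S X out) := by unfold Spec_next_occur; infer_instance

-- ===== CLAIM (what is proved, stated in full; the proofs are below) =====
def Claim_equal_next_occur : Prop := ∀ (S : String) (X : String), Dom_next_occur S X → Spec_next_occur S X (next_occur S X)

-- ===== LEMMAS AND PROOFS =====

-- reference: result[i] = index of the first occurrence of X at or after position i, else -1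
def refNext (X : String) : List Char → Int → List Int
  | [], _ => []
  | c :: t, i =>
    (if X.toList = [c] then i else (refNext X t (i + 1)).headD (-1)) :: refNext X t (i + 1)

-- the sequence of values A's loop writes (reversed-string order)
def genA (X : String) (n : Int) : Nat → Int → List Char → List Int
  | _, _, [] => []
  | k, prev, c :: rest =>
    let w := if X.toList = [c] then n - k - 1 else prev
    w :: genA X n (k + 1) w rest

-- positions of the matching characters, starting at index i
def matchIdx (X : String) : List Char → Int → List Int
  | [], _ => []
  | c :: t, i => if X.toList = [c] then i :: matchIdx X t (i + 1) else matchIdx X t (i + 1)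

-- B's output as blocks: each occurrence p fills [start, p] with p, the tail stays -1
def buildB : Nat → Int → List Int → List Int
  | m, _, [] => List.replicate m (-1)
  | m, start, p :: ps =>
      List.replicate (p - start + 1).toNat p ++ buildB (m - (p - start + 1).toNat) (p + 1) ps

-- strictly increasing, within [s, n)
def chainIdx (s n : Int) : List Int → Prop
  | [] => True
  | p :: ps => s ≤ p ∧ p < n ∧ chainIdx (p + 1) n ps

theorem chainIdx_mono {s s' n : Int} (h : s ≤ s') : ∀ {ps : List Int}, chainIdx s' n ps → chainIdx s n ps
  | [], _ => trivial
  | _ :: _, ⟨h1, h2, h3⟩ => ⟨le_trans h h1, h2, h3⟩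

theorem matchIdx_chain (X : String) : ∀ (l : List Char) (s : Int),
    chainIdx s (s + l.length) (matchIdx X l s) := by
  intro l
  induction l with
  | nil => intro s; trivial
  | cons c t ih =>
    intro s
    have hb : (s + 1) + (t.length : Int) = s + ((t.length + 1 : Nat) : Int) := by push_cast; ring
    simp only [matchIdx, List.length_cons]
    split
    · refine ⟨le_refl s, by push_cast; omega, ?_⟩
      have := ih (s + 1); rwa [hb] at this
    · refine chainIdx_mono (s' := s + 1) (by omega) ?_
      have := ih (s + 1); rwa [hb] at this

theorem positions_eq_matchIdx (X : String) : ∀ (l : List Char) (s : Int),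
    ((PySem.List.enumerate l s).filter (fun ic => X.toList == [ic.2])).map (·.1)
      = matchIdx X l s := by
  intro l
  induction l with
  | nil => intro s; simp [PySem.List.enumerate_nil, matchIdx]
  | cons c t ih =>
    intro s
    rw [PySem.List.enumerate_cons, List.filter_cons]
    by_cases h : X.toList = [c]
    · rw [if_pos (by simpa using h)]
      simp only [List.map_cons, matchIdx, if_pos h, ih]
    · rw [if_neg (by simpa using h)]
      simp only [matchIdx, if_neg h, ih]

-- ===== A-side =====

theorem genA_snoc (X : String) (n : Int) (c : Char) : ∀ (a : List Char) (k : Nat) (prev : Int),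
    genA X n k prev (a ++ [c])
      = genA X n k prev a
        ++ [if X.toList = [c] then n - (k + a.length) - 1 else (genA X n k prev a).getLastD prev] := by
  intro a
  induction a with
  | nil => intro k prev; simp [genA]
  | cons d t ih =>
    intro k prev
    simp only [List.cons_append, genA, ih, List.getLastD_cons, List.length_cons]
    have harith : n - ((k + 1 : Nat) + (t.length : Int)) - 1
        = n - ((k : Int) + ((t.length + 1 : Nat) : Int)) - 1 := by push_cast; ring
    rw [harith]

theorem genA_reverse (X : String) (n : Int) : ∀ (l : List Char) (k : Nat),
    genA X n k (-1) l.reverse = (refNext X l (n - k - l.length)).reverse := by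
  intro l
  induction l with
  | nil => intro k; simp [genA, refNext]
  | cons c t ih =>
    intro k
    have hrev : (c :: t).reverse = t.reverse ++ [c] := by simp
    rw [hrev, genA_snoc, ih]
    have hgl : ∀ (xs : List Int), (xs.reverse).getLastD (-1) = xs.headD (-1) := by
      intro xs
      rw [List.getLastD_eq_getLast?, List.getLast?_reverse, List.headD_eq_head?]
    simp only [refNext, List.reverse_cons, List.length_reverse, List.length_cons, hgl]
    have h1 : n - ((k : Int) + (t.length : Int)) - 1 = n - (k : Int) - ((t.length + 1 : Nat) : Int) := by
      push_cast; ring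
    have h2 : n - (k : Int) - ((t.length + 1 : Nat) : Int) + 1 = n - (k : Int) - (t.length : Int) := by
      push_cast; ring
    rw [h1, h2]

theorem loopA_spec (X : String) : ∀ (chars : List Char) (k : Nat) (acc : List Int) (prev : Int),
    k + chars.length = acc.length →
    (∀ j (h : j < acc.length), k ≤ j → acc[j] = -1) →
    (k = 0 → prev = -1) →
    (∀ (h : k - 1 < acc.length), 0 < k → acc[k - 1] = prev) →
    nextOccurLoopA X (acc.length) (PySem.List.enumerate chars (k : Int)) acc
      = acc.take k ++ genA X (acc.length) k prev chars := by
  intro chars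
  induction chars with
  | nil =>
    intro k acc prev hlen _ _ _
    have hk : k = acc.length := by simpa using hlen
    subst hk
    simp [PySem.List.enumerate_nil, nextOccurLoopA, genA]
  | cons c rest ih =>
    intro k acc prev hlen hneg h0 hk
    have hklt : k < acc.length := by simp at hlen; omega
    rw [PySem.List.enumerate_cons]
    simp only [nextOccurLoopA]
    have hget : (PySem.List.pyGet? acc ((k : Int) - 1)).getD (-1) = prev := by
      rcases Nat.eq_zero_or_pos k with hk0 | hkpos
      · subst hk0
        rw [show ((0 : Nat) : Int) - 1 = -1 by ring, PySem.List.pyGet?_neg_one,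
          List.getLast?_eq_getElem?]
        have hsome : acc[acc.length - 1]? = some (-1 : Int) := by
          rw [List.getElem?_eq_getElem (by omega)]
          exact congrArg some (hneg _ (by omega) (by omega))
        rw [hsome]; simp [h0 rfl]
      · have hcast : ((k : Int) - 1) = ((k - 1 : Nat) : Int) := by omega
        rw [hcast, PySem.List.pyGet?_natCast, List.getElem?_eq_getElem (by omega)]
        simp [hk (by omega) hkpos]
    set w : Int := if X.toList = [c] then (acc.length : Int) - k - 1 else prev with hw
    have hbody : (if X.toList = [c]
          then acc.set ((k : Int)).toNat ((acc.length : Int) - (k : Int) - 1)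
          else acc.set ((k : Int)).toNat ((PySem.List.pyGet? acc ((k : Int) - 1)).getD (-1)))
        = acc.set k w := by
      rw [hget]
      by_cases hc : X.toList = [c] <;> simp [hw, hc]
    rw [hbody]
    have hcast1 : ((k : Int) + 1) = (((k + 1 : Nat)) : Int) := by push_cast; ring
    rw [hcast1]
    have hrec := ih (k + 1) (acc.set k w) w
      (by simp at hlen ⊢; omega)
      (by
        intro j hj hkj
        rw [List.getElem_set_ne (by omega)]
        exact hneg j (by simpa using hj) (by omega))
      (by omega)
      (by
        intro h _
        have hkk : k + 1 - 1 = k := by omega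
        simp only [hkk]
        exact List.getElem_set_self (by simpa using hklt))
    have hslen : (acc.set k w).length = acc.length := by simp
    rw [hslen] at hrec
    rw [hrec]
    have htake : (acc.set k w).take (k + 1) = acc.take k ++ [w] := by
      rw [List.set_eq_take_append_cons_drop, if_pos hklt, List.take_append]
      have hlt : (acc.take k).length = k := by simp; omega
      simp [hlt]
    rw [htake, List.append_assoc]
    congr 1

theorem next_occur_eq_ref (S X : String) :
    next_occur S X = refNext X S.toList 0 := by
  have h := loopA_spec X S.toList.reverse 0 (List.replicate S.toList.length (-1)) (-1)
    (by simp) (by intro j hj _; simp) (fun _ => rfl) (by intro _ h; omega)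
  unfold next_occur
  rw [show ((0 : Nat) : Int) = 0 from rfl] at h
  simp only [List.length_replicate] at h
  rw [h, List.take_zero, List.nil_append, genA_reverse]
  simp

-- ===== B-side =====

theorem fill_spec (o : Int) : ∀ (k : Nat) (s : Int) (res : List Int), 0 ≤ s →
    s.toNat + k ≤ res.length →
    (PySem.List.pyRange s (s + (k : Int))).foldl (fun r p => r.set p.toNat o) res
      = res.take s.toNat ++ List.replicate k o ++ res.drop (s.toNat + k) := by
  intro k
  induction k with
  | zero =>
    intro s res _ _
    have h0 : s + ((0 : Nat) : Int) = s := by simp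
    have hnil : PySem.List.pyRange s s = [] := by simp [pysem]
    rw [h0, hnil]
    simp
  | succ k ih =>
    intro s res hs hlen
    have hlt : s < s + ((k + 1 : Nat) : Int) := by push_cast; omega
    rw [PySem.List.pyRange_one_cons hlt, List.foldl_cons]
    have hcast : s + ((k + 1 : Nat) : Int) = (s + 1) + (k : Int) := by push_cast; ring
    rw [hcast]
    have hsl : s.toNat < res.length := by omega
    have hstep := ih (s + 1) (res.set s.toNat o) (by omega) (by simp; omega)
    rw [hstep]
    have ht1 : (s + 1).toNat = s.toNat + 1 := by omega
    rw [ht1]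
    have htake : (res.set s.toNat o).take (s.toNat + 1) = res.take s.toNat ++ [o] := by
      rw [List.set_eq_take_append_cons_drop, if_pos hsl, List.take_append]
      have hlt2 : (res.take s.toNat).length = s.toNat := by simp; omega
      simp [hlt2]
    have hdrop : (res.set s.toNat o).drop (s.toNat + 1 + k) = res.drop (s.toNat + (k + 1)) := by
      rw [List.drop_set, if_pos (by omega)]
      congr 1; omega
    rw [htake, hdrop]
    simp [List.append_assoc, List.replicate_succ]

theorem loopB_spec : ∀ (ps : List Int) (pre : List Int) (m : Nat),
    chainIdx (pre.length : Int) ((pre.length + m : Nat) : Int) ps →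
    (ps.foldl (fun (st : List Int × Int) o => (nextOccurFillB o st.1 st.2, o + 1))
        (pre ++ List.replicate m (-1), (pre.length : Int))).1
      = pre ++ buildB m (pre.length : Int) ps := by
  intro ps
  induction ps with
  | nil => intro pre m _; simp [buildB]
  | cons p rest ih =>
    intro pre m hch
    obtain ⟨hsp, hpn, hch'⟩ := hch
    have hpn' : p < (pre.length : Int) + (m : Int) := by push_cast at hpn ⊢; omega
    simp only [List.foldl_cons]
    set k : Nat := (p - (pre.length : Int) + 1).toNat with hkdef
    have hk1 : p + 1 = (pre.length : Int) + (k : Int) := by omega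
    have hkm : k ≤ m := by omega
    have hfill : nextOccurFillB p (pre ++ List.replicate m (-1)) (pre.length : Int)
        = (pre ++ List.replicate k p) ++ List.replicate (m - k) (-1) := by
      unfold nextOccurFillB
      rw [hk1, fill_spec p k (pre.length : Int) _ (Int.natCast_nonneg _) (by simp; omega)]
      have ht : (pre ++ List.replicate m (-1 : Int)).take ((pre.length : Int)).toNat = pre := by
        simp
      have hd : (pre ++ List.replicate m (-1 : Int)).drop (((pre.length : Int)).toNat + k)
          = List.replicate (m - k) (-1) := by
        simp [List.drop_append, List.drop_replicate]
      rw [ht, hd, List.append_assoc]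
    rw [hfill]
    have hlen2 : (((pre ++ List.replicate k p).length : Nat) : Int) = p + 1 := by simp; omega
    have hlen3 : (pre ++ List.replicate k p).length + (m - k) = pre.length + m := by simp; omega
    have hrec := ih (pre ++ List.replicate k p) (m - k) (by rw [hlen3, hlen2]; exact hch')
    rw [hlen2] at hrec
    rw [hrec, List.append_assoc]
    congr 1

theorem ref_eq_buildB (X : String) : ∀ (l : List Char) (i : Int),
    refNext X l i = buildB l.length i (matchIdx X l i) := by
  intro l
  induction l with
  | nil => intro i; simp [refNext, matchIdx, buildB]
  | cons c t ih =>
    intro i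
    simp only [refNext, matchIdx, List.length_cons]
    by_cases h : X.toList = [c]
    · simp only [if_pos h]
      simp [buildB, List.replicate_succ, ih]
    · simp only [if_neg h]
      have hch := matchIdx_chain X t (i + 1)
      rcases hm : matchIdx X t (i + 1) with _ | ⟨p, ps⟩
      · rw [ih, hm]
        rcases hn : t.length with _ | n <;> simp [buildB, List.replicate_succ]
      · rw [hm] at hch
        obtain ⟨hip, _, _⟩ := hch
        rw [ih, hm]
        simp only [buildB]
        have h1 : (p - (i + 1) + 1).toNat = (p - i).toNat := by omega
        have h2 : (p - i + 1).toNat = (p - i).toNat + 1 := by omega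
        have h4 : t.length + 1 - ((p - i).toNat + 1) = t.length - (p - i).toNat := by omega
        obtain ⟨j, hj⟩ : ∃ j, (p - i).toNat = j + 1 := ⟨(p - i).toNat - 1, by omega⟩
        rw [h1, h2, h4, hj, List.replicate_succ, List.cons_append, List.headD_cons]
        simp [List.replicate_succ]

theorem alt_eq_ref (S X : String) : next_occur_alt S X = refNext X S.toList 0 := by
  unfold next_occur_alt
  rw [positions_eq_matchIdx]
  have h := loopB_spec (matchIdx X S.toList 0) [] S.toList.length
    (by simpa using matchIdx_chain X S.toList 0)
  simpa [ref_eq_buildB] using h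

-- ===== VERDICT (by name: the statement is the Claim_ definition above) =====
theorem next_occur_spec : Claim_equal_next_occur := by
  intro S X _
  unfold Spec_next_occur
  rw [next_occur_eq_ref, alt_eq_ref]
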